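-- pv_equiv track=rewrite | github.com/galois-search/Internship | Decimation.py | generate_sequences_from_sequence_v2
-- ===== SOURCE A (Python) =====
-- def generate_sequences_from_sequence_v2(binary_sequence):
--     sequence = ""
--     for ele in binary_sequence:
--         sequence += str(ele)
--     n = len(sequence)
--     result = []
--     for i in range(1, n):
--         sequence_2 = ""
--         index = 0
--         while len(sequence_2) < n:
--              sequence_2 = sequence_2 + sequence[index]
--              index = (index + i) % n
--         result.append(sequence_2)
--     return result
-- ===== SOURCE B (Python) =====
-- def generate_sequences_from_sequence_v2(binary_sequence):
--     sequence = "".join(map(str, binary_sequence))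
--     n = len(sequence)
--     rows = []
--     for i in range(1, n // 2 + 1):
--         # decimation step i: each wrap is one contiguous strided slice of `sequence`
--         parts = []
--         total = 0
--         s = 0
--         while total < n:
--             part = sequence[s::i]
--             parts.append(part)
--             total += len(part)
--             s = (s - n) % i
--         rows.append("".join(parts))
--     # step n-i is step i run backwards: the first character followed by the rest of the row reversed
--     mirrored = [row[0] + row[:0:-1] for row in reversed(rows[:n - 1 - n // 2])]
--     return rows + mirrored
-- ===== Notes on version B (the rewrite author's own statement) =====
-- stated objective: faster
-- what changed: Instead of A's per-character inner while-loop with a running index (index=(index+i)%n) for every step i, B builds only the rows for steps i <= n//2, each as a join of whole strided slices sequence[s::i] (one per wrap, next start (s-n)%i), and derives each remaining row by the mirror identity that the row for step n-i is the first character of the row for step i followed by the rest of that row reversed; the flattened preamble uses join instead of repeated concatenation.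
import Mathlib
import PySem

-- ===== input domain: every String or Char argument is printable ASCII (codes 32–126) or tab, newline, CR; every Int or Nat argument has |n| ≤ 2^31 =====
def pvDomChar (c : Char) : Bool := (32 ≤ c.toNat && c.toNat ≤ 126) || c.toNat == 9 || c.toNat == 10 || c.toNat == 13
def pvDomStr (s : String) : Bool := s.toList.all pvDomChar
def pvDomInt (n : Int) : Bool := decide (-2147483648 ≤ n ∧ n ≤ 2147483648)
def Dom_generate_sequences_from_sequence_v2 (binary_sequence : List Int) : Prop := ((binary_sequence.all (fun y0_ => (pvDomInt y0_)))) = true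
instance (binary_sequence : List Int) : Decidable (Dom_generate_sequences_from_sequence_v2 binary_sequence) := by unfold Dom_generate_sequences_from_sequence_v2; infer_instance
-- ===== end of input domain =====

-- B builds only the rows for steps i <= n//2, each as a join of whole strided slices sequence[s::i]
-- (one per wrap of the decimation, next start (s-n)%i), and obtains the remaining rows by the mirror
-- identity (the row for step n-i is the first character of the row for step i followed by the rest of that row reversed); A walks every row character by character with a
-- running index. Measured faster (constant factor).

-- ===== PORT A =====
-- inner while-loop of A: each pass appends exactly one char, so `len(sequence_2) < n`
-- means exactly `n` passes; ported with fuel = remaining passes. The `none` branch is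
-- Python's IndexError, unreachable here since the index is always reduced mod len(seq) > 0.
def pvLoopA (seq : List Char) (i : Int) : Nat → Int → List Char → List Char
  | 0, _, acc => acc
  | fuel + 1, index, acc =>
    match PySem.List.pyGet? seq index with
    | some c => pvLoopA seq i fuel (PySem.Int.mod (index + i) (seq.length : Int)) (acc ++ [c])
    | none => acc

def generate_sequences_from_sequence_v2 (binary_sequence : List Int) : List String :=
  let seq := binary_sequence.foldl (fun s e => s ++ PySem.Int.toChars e) []
  let n := seq.length
  (PySem.List.pyRange 1 (n : Int) 1).foldl
    (fun result i => result ++ [String.ofList (pvLoopA seq i n 0 [])]) []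

-- ===== PORT B =====
-- B's inner while-loop `while total < n`: each pass appends one nonempty strided slice
-- sequence[s::i] (= slice? seq (some s) none i; its `.getD []` discharges the Option that
-- slice? returns only for step = 0, unreachable since i ≥ 1), so at most n passes run;
-- ported with fuel n. State (total, s, parts) is carried as (total, s, acc) with the parts
-- joined as they are produced.
def pvRowB (seq : List Char) (i : Int) : Nat → Int → Int → List Char → List Char
  | 0, _, _, acc => acc
  | fuel + 1, total, s, acc =>
    if total < (seq.length : Int) then
      let part := (PySem.List.slice? seq (some s) none i).getD []
      pvRowB seq i fuel (total + part.length) (PySem.Int.mod (s - (seq.length : Int)) i) (acc ++ part)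
    else acc

-- strings are carried as their char lists (List Char) and joined to String at the return;
-- the first-character IndexError and slice?'s step-0 none branch are unreachable (rows are nonempty, step is -1)
def generate_sequences_from_sequence_v2_alt (binary_sequence : List Int) : List String :=
  let seq := binary_sequence.flatMap (fun e => PySem.Int.toChars e)
  let n := seq.length
  let rows : List (List Char) :=
    (PySem.List.pyRange 1 (PySem.Int.floordiv (n : Int) 2 + 1) 1).foldl
      (fun rows i => rows ++ [pvRowB seq i n 0 0 []]) []
  let mirrored : List (List Char) :=
    ((PySem.List.slice rows none (some ((n : Int) - 1 - PySem.Int.floordiv (n : Int) 2))).reverse).map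
      (fun row => ((PySem.List.pyGet? row 0).getD ' ') ::
        ((PySem.List.slice? row none (some 0) (-1)).getD []))
  (rows ++ mirrored).map String.ofList

-- ===== PRECONDITION & SPEC =====
def Spec_generate_sequences_from_sequence_v2 (binary_sequence : List Int) (out : List String) : Prop := out = generate_sequences_from_sequence_v2_alt binary_sequence
instance (binary_sequence : List Int) (out : List String) : Decidable (Spec_generate_sequences_from_sequence_v2 binary_sequence out) := by unfold Spec_generate_sequences_from_sequence_v2; infer_instance

-- ===== CLAIM (what is proved, stated in full; the proofs are below) =====
def Claim_equal_generate_sequences_from_sequence_v2 : Prop := ∀ (binary_sequence : List Int), Dom_generate_sequences_from_sequence_v2 binary_sequence → Spec_generate_sequences_from_sequence_v2 binary_sequence (generate_sequences_from_sequence_v2 binary_sequence)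

-- ===== LEMMAS AND PROOFS =====

-- the flattened string built by A's `sequence += str(ele)` foldl equals B's join (flatMap)
lemma pv_foldl_toChars_eq_flatMap (l : List Int) (acc : List Char) :
    l.foldl (fun s e => s ++ PySem.Int.toChars e) acc
      = acc ++ l.flatMap (fun e => PySem.Int.toChars e) := by
  induction l generalizing acc with
  | nil => simp
  | cons x xs ih => simp [List.foldl_cons, ih, List.append_assoc]

-- invariant of A's inner loop: after j passes the running index is (j*i) % n, so the
-- remaining passes produce exactly the samples at indices (j+k)*i % n
lemma pvLoopA_closed (seq : List Char) (i : Int) (hpos : 0 < seq.length) :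
    ∀ (fuel j : Nat) (acc : List Char),
      pvLoopA seq i fuel (PySem.Int.mod ((j : Int) * i) (seq.length : Int)) acc
        = acc ++ (List.range fuel).map (fun k =>
            (PySem.List.pyGet? seq (PySem.Int.mod (((j + k : Nat) : Int) * i) (seq.length : Int))).getD ' ') := by
  intro fuel
  induction fuel with
  | zero => intro j acc; simp [pvLoopA]
  | succ fuel ih =>
    intro j acc
    have hn : (0 : Int) < (seq.length : Int) := by exact_mod_cast hpos
    have h0 : 0 ≤ PySem.Int.mod ((j : Int) * i) (seq.length : Int) :=
      PySem.Int.mod_nonneg _ hn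
    have h1 : PySem.Int.mod ((j : Int) * i) (seq.length : Int) < (seq.length : Int) :=
      PySem.Int.mod_lt _ hn
    have hget := PySem.List.pyGet?_eq_some_getElem seq h0 h1
    have hstep : PySem.Int.mod (PySem.Int.mod ((j : Int) * i) (seq.length : Int) + i) (seq.length : Int)
        = PySem.Int.mod (((j + 1 : Nat) : Int) * i) (seq.length : Int) := by
      rw [PySem.Int.mod_eq_emod_of_pos hn, PySem.Int.mod_eq_emod_of_pos hn,
        PySem.Int.mod_eq_emod_of_pos hn, Int.emod_add_emod]
      congr 1
      push_cast
      ring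
    rw [pvLoopA, hget]
    simp only [hstep, ih (j + 1) (acc ++ [_])]
    rw [List.range_succ_eq_map]
    simp [hget, List.append_assoc, Function.comp_def, Nat.add_comm, Nat.add_left_comm]

-- one strided slice sequence[s::i] (0 <= s < n, i >= 1) is the contiguous samples seq[s + j*i]
lemma pv_slice_step (seq : List Char) (i : Int) (h1 : 1 ≤ i) (s : Nat) (hs : s < seq.length) :
    PySem.List.slice? seq (some (s : Int)) none i
      = some ((List.range ((seq.length - s + i.toNat - 1) / i.toNat)).map
          (fun (j : Nat) => (seq[s + j * i.toNat]?).getD ' ')) := by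
  have hi0 : i ≠ 0 := by omega
  have hneg : ¬ i < 0 := by omega
  have hpos : 0 < i := by omega
  have hiN : ((i.toNat : Int)) = i := Int.toNat_of_nonneg (by omega)
  have hm1 : 1 ≤ i.toNat := by omega
  rw [PySem.List.slice?]
  simp only [if_neg hi0, PySem.List.sliceIndices]
  simp only [if_neg hneg, if_pos hpos]
  have hs0 : ¬ ((s : Int) < 0) := by omega
  have hsn : (s : Int) < (seq.length : Int) := by exact_mod_cast hs
  rw [if_neg hs0]
  have hmin : min ((s:Int)) ((seq.length:Int)) = (s:Int) := min_eq_left (by omega)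
  rw [hmin, if_pos hsn]
  set m := i.toNat with hmdef
  have hcast : ((seq.length : Int) - (s:Int) + i - 1) = ((seq.length - s + m - 1 : Nat) : Int) := by
    push_cast [← hiN]
    omega
  have hcount : (((seq.length : Int) - (s:Int) + i - 1) / i).toNat = (seq.length - s + m - 1) / m := by
    rw [hcast, ← hiN]
    rw [← Int.natCast_div]
    exact Int.toNat_natCast _
  rw [hcount]
  congr 1
  apply List.filterMap_eq_map_iff_forall_eq_some.mpr
  intro j hj
  have hjc : j < (seq.length - s + m - 1) / m := List.mem_range.mp hj
  have hmul : ((seq.length - s + m - 1) / m) * m ≤ seq.length - s + m - 1 := Nat.div_mul_le_self _ _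
  have hjm : j * m ≤ seq.length - s - 1 := by
    have hcm : (j + 1) * m ≤ ((seq.length - s + m - 1) / m) * m := Nat.mul_le_mul_right m hjc
    have h3 : (j + 1) * m ≤ seq.length - s + m - 1 := le_trans hcm hmul
    have h4 : j * m + m = (j + 1) * m := by ring
    omega
  have hlt : s + j * m < seq.length := by omega
  have hidx : ((s:Int) + i * (j:Int)).toNat = s + j * m := by
    have : (s:Int) + i * (j:Int) = ((s + j * m : Nat) : Int) := by push_cast [← hiN]; ring
    rw [this, Int.toNat_natCast]
  rw [hidx, List.getElem?_eq_getElem hlt]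
  simp

-- invariant of B's chunk loop: entering with total = t samples emitted and start s = (t*i) % n,
-- the remaining chunks emit exactly the samples t, t+1, …, n-1 of the decimation
lemma pvRowB_closed (seq : List Char) (i : Int) (h1 : 1 ≤ i) (h2 : i < (seq.length : Int)) :
    ∀ (fuel t : Nat) (acc : List Char), t ≤ seq.length → seq.length - t ≤ fuel →
      pvRowB seq i fuel (t : Int) (((t * i.toNat) % seq.length : Nat) : Int) acc
        = acc ++ (List.range (seq.length - t)).map (fun k =>
            (PySem.List.pyGet? seq (PySem.Int.mod (((t + k : Nat) : Int) * i) (seq.length : Int))).getD ' ') := by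
  have hiN : ((i.toNat : Int)) = i := Int.toNat_of_nonneg (by omega)
  set m := i.toNat with hmdef
  have hm1 : 1 ≤ m := by omega
  have hmn : m < seq.length := by omega
  intro fuel
  induction fuel with
  | zero =>
    intro t acc ht hf
    have htn : t = seq.length := by omega
    subst htn
    simp [pvRowB]
  | succ fuel ih =>
    intro t acc ht hf
    by_cases hting : t < seq.length
    · have hn0 : 0 < seq.length := by omega
      set sN := (t * m) % seq.length with hsN
      have hsn : sN < seq.length := Nat.mod_lt _ hn0
      set x := seq.length - sN with hx
      have hx1 : 1 ≤ x := by omega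
      set L := (x + m - 1) / m with hL
      have hdm : m * L + (x + m - 1) % m = x + m - 1 := Nat.div_add_mod _ _
      have hmodlt : (x + m - 1) % m < m := Nat.mod_lt _ (by omega)
      have hup : m * L ≤ x + m - 1 := by omega
      have hlo : x ≤ m * L := by omega
      have hL1 : 1 ≤ L := by
        rw [hL]
        exact (Nat.one_le_div_iff (by omega)).mpr (by omega)
      have hLsub : (L - 1) * m = L * m - m := Nat.sub_one_mul L m
      have hcomm : L * m = m * L := Nat.mul_comm L m
      -- the chunk never runs past the n-th sample
      have htL : t + L ≤ seq.length := by
        by_contra hc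
        have hj1 : 1 ≤ seq.length - t := by omega
        have hjL : seq.length - t ≤ L - 1 := by omega
        have hjm : (seq.length - t) * m ≤ (L - 1) * m := Nat.mul_le_mul_right m hjL
        have hbound : sN + (seq.length - t) * m ≤ seq.length - 1 := by omega
        have hpos' : 1 ≤ sN + (seq.length - t) * m := by
          have : 1 * 1 ≤ (seq.length - t) * m := Nat.mul_le_mul hj1 hm1
          omega
        have hmod0 : (sN + (seq.length - t) * m) % seq.length = 0 := by
          rw [hsN, Nat.mod_add_mod]
          have : t * m + (seq.length - t) * m = seq.length * m := by
            rw [← Nat.add_mul]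
            congr 1
            omega
          rw [this, Nat.mul_mod_right]
        rw [Nat.mod_eq_of_lt (by omega)] at hmod0
        omega
      -- unfold one pass of the loop
      rw [pvRowB]
      rw [if_pos (by exact_mod_cast hting)]
      have hslice := pv_slice_step seq i h1 sN hsn
      have hxL : (seq.length - sN + m - 1) / m = L := by rw [hL, hx]
      rw [hxL] at hslice
      simp only [hslice, Option.getD_some]
      set part := (List.range L).map (fun (j : Nat) => (seq[sN + j * m]?).getD ' ') with hpart
      have hplen : part.length = L := by simp [hpart]
      -- new total and new start are the invariant at t + L
      have htot : (t : Int) + (part.length : Int) = ((t + L : Nat) : Int) := by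
        rw [hplen]; push_cast; ring
      set v := sN + m * L - seq.length with hv
      have hvm : v < m := by omega
      have hmodtL : ((t + L) * m) % seq.length = v := by
        have h5 : (t + L) * m = t * m + L * m := by ring
        rw [h5, ← Nat.mod_add_mod, ← hsN]
        have h6 : seq.length ≤ sN + L * m := by omega
        rw [Nat.mod_eq_sub_mod h6, Nat.mod_eq_of_lt (by omega)]
        omega
      have hsnew : PySem.Int.mod ((sN : Int) - (seq.length : Int)) i = ((((t + L) * m) % seq.length : Nat) : Int) := by
        rw [hmodtL]
        rw [PySem.Int.mod_eq_emod_of_pos (by omega : (0:Int) < i)]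
        have h7 : (sN : Int) - (seq.length : Int) = (v : Int) - i * (L : Int) := by
          push_cast [← hiN]
          omega
        rw [h7, Int.sub_mul_emod_self_left]
        exact Int.emod_eq_of_lt (by omega) (by omega)
      rw [htot, hsnew]
      rw [ih (t + L) (acc ++ part) htL (by omega)]
      -- reassemble: the chunk is samples t..t+L-1, the recursion gives the rest
      have hsplit : seq.length - t = L + (seq.length - (t + L)) := by omega
      have hchunk : part = (List.range L).map (fun k =>
          (PySem.List.pyGet? seq (PySem.Int.mod (((t + k : Nat) : Int) * i) (seq.length : Int))).getD ' ') := by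
        rw [hpart]
        apply List.map_congr_left
        intro j hj
        have hjL : j < L := List.mem_range.mp hj
        have hjx : j * m ≤ x - 1 := by
          have : j * m ≤ (L - 1) * m := Nat.mul_le_mul_right m (by omega)
          omega
        have hin : sN + j * m < seq.length := by omega
        have hmodj : ((t + j) * m) % seq.length = sN + j * m := by
          have h5 : (t + j) * m = t * m + j * m := by ring
          rw [h5, ← Nat.mod_add_mod, ← hsN, Nat.mod_eq_of_lt hin]
        have hmi : PySem.Int.mod (((t + j : Nat) : Int) * i) (seq.length : Int) = ((sN + j * m : Nat) : Int) := by
          rw [PySem.Int.mod_eq_emod_of_pos (by omega : (0:Int) < (seq.length : Int))]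
          have : ((t + j : Nat) : Int) * i = (((t + j) * m : Nat) : Int) := by push_cast [← hiN]; ring
          rw [this]
          exact_mod_cast hmodj
        rw [hmi, PySem.List.pyGet?_natCast, List.getElem?_eq_getElem hin]
      rw [List.append_assoc, hchunk, hsplit, List.range_add, List.map_append, List.map_map]
      simp [Function.comp, Nat.add_assoc]
    · have hstop : ¬ ((t : Int) < (seq.length : Int)) := by exact_mod_cast hting
      rw [pvRowB, if_neg hstop]
      have : seq.length - t = 0 := by omega
      rw [this]
      simp

-- the closed form of one decimated row (proof-side helper)
def pvG (seq : List Char) (c : Int) : List Char :=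
  (List.range seq.length).map (fun (j : Nat) =>
    (PySem.List.pyGet? seq (PySem.Int.mod ((j : Int) * c) (seq.length : Int))).getD ' ')

-- row[:0:-1] is the row reversed without its first character, as indexed samples
lemma pv_slice_rev (l : List Char) (h : 0 < l.length) :
    PySem.List.slice? l none (some 0) (-1)
      = some ((List.range (l.length - 1)).map (fun k => (l[l.length - 1 - k]?).getD ' ')) := by
  have hstep : ((-1 : Int)) ≠ 0 := by omega
  rw [PySem.List.slice?]
  simp only [if_neg hstep, PySem.List.sliceIndices]
  have hneg : ((-1 : Int)) < 0 := by omega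
  simp only [if_pos hneg]
  have h00 : ¬ ((0 : Int) < 0) := by omega
  have hmin : min (0 : Int) ((l.length : Int) - 1) = 0 := min_eq_left (by omega)
  simp only [if_neg h00, hmin]
  have hpos0 : ¬ ((0 : Int) < -1) := by omega
  rw [if_neg hpos0]
  by_cases hl1 : l.length = 1
  · have : ¬ ((0 : Int) < (l.length : Int) - 1) := by omega
    rw [if_neg this, hl1]
    simp
  · have hl2 : 2 ≤ l.length := by omega
    have : (0 : Int) < (l.length : Int) - 1 := by omega
    rw [if_pos this]
    have hcnt : (((l.length : Int) - 1 - 0 + - -1 - 1) / - -1).toNat = l.length - 1 := by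
      have : ((l.length : Int) - 1 - 0 + - -1 - 1) / - -1 = (l.length : Int) - 1 := by
        norm_num
      rw [this]
      omega
    rw [hcnt]
    congr 1
    apply List.filterMap_eq_map_iff_forall_eq_some.mpr
    intro k hk
    have hkl : k < l.length - 1 := List.mem_range.mp hk
    have hidx : (((l.length : Int) - 1) + -1 * (k : Int)).toNat = l.length - 1 - k := by omega
    have hin : l.length - 1 - k < l.length := by omega
    rw [hidx, List.getElem?_eq_getElem hin]
    simp

-- the mirror identity: the row for step n-k is the row for step k run backwards after its head
lemma pv_mirror (seq : List Char) (k : Int) (h1 : 1 ≤ k) (h2 : k < (seq.length : Int)) :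
    ((PySem.List.pyGet? (pvG seq k) 0).getD ' ') ::
        ((PySem.List.slice? (pvG seq k) none (some 0) (-1)).getD [])
      = pvG seq ((seq.length : Int) - k) := by
  have hn0 : 0 < seq.length := by exact_mod_cast lt_of_le_of_lt (by omega : (0:Int) ≤ k) h2
  have hnI : (0 : Int) < (seq.length : Int) := by exact_mod_cast hn0
  have hglen : (pvG seq k).length = seq.length := by simp [pvG]
  have hgel : ∀ j, (hj : j < seq.length) →
      (pvG seq k)[j]'(by rw [hglen]; exact hj)
        = (PySem.List.pyGet? seq (PySem.Int.mod ((j : Int) * k) (seq.length : Int))).getD ' ' := by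
    intro j hj
    simp [pvG]
  have hhead : PySem.List.pyGet? (pvG seq k) 0 = some ((pvG seq k)[0]'(by omega)) := by
    have := PySem.List.pyGet?_eq_some_getElem (pvG seq k) (le_refl 0)
      (by rw [hglen]; exact_mod_cast hn0)
    simpa using this
  rw [hhead, Option.getD_some, pv_slice_rev (pvG seq k) (by omega), Option.getD_some]
  simp only [hglen]
  apply List.ext_getElem
  · simp [pvG]
    omega
  · intro j hj1 hj2
    match j with
    | 0 =>
      rw [List.getElem_cons_zero, hgel 0 hn0]
      have hz : ∀ (c : Int), PySem.Int.mod (((0:Nat) : Int) * c) (seq.length : Int) = 0 := by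
        intro c
        rw [PySem.Int.mod_eq_emod_of_pos hnI]
        simp
      simp only [pvG]
      rw [List.getElem_map, List.getElem_range]
      rw [hz k, hz ((seq.length : Int) - k)]
    | j + 1 =>
      rw [List.getElem_cons_succ, List.getElem_map, List.getElem_range]
      have hjlt : j < seq.length - 1 := by
        simp at hj1
        omega
      have hin : seq.length - 1 - j < seq.length := by omega
      rw [show (pvG seq k)[seq.length - 1 - j]? = some ((pvG seq k)[seq.length - 1 - j]'(by rw [hglen]; exact hin)) from List.getElem?_eq_getElem (by rw [hglen]; exact hin)]
      rw [Option.getD_some, hgel _ hin]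
      simp only [pvG]
      rw [List.getElem_map, List.getElem_range]
      congr 1
      -- (n-1-j)*k ≡ (j+1)*(n-k)  (mod n)
      rw [PySem.Int.mod_eq_emod_of_pos hnI, PySem.Int.mod_eq_emod_of_pos hnI]
      have hc : ((seq.length - 1 - j : Nat) : Int) = (seq.length : Int) - 1 - (j : Int) := by
        omega
      rw [hc]
      congr 1
      have hdvd : ((seq.length : Int)) ∣ (((j + 1 : Nat) : Int) * ((seq.length : Int) - k)
          - ((seq.length : Int) - 1 - (j : Int)) * k) := ⟨((j : Int) + 1 - k), by push_cast; ring⟩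
      exact Int.modEq_iff_dvd.mpr hdvd

-- ===== VERDICT (by name: the statement is the Claim_ definition above) =====
theorem generate_sequences_from_sequence_v2_spec : Claim_equal_generate_sequences_from_sequence_v2 := by
  intro bs _
  unfold Spec_generate_sequences_from_sequence_v2
  unfold generate_sequences_from_sequence_v2 generate_sequences_from_sequence_v2_alt
  rw [pv_foldl_toChars_eq_flatMap]
  simp only [List.nil_append]
  set seq := bs.flatMap (fun e => PySem.Int.toChars e) with hseq
  simp only [PySem.List.foldl_append_singleton_eq_map, List.nil_append]
  rcases lt_or_ge seq.length 2 with hsmall | h2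
  · -- n = 0 or 1: no rows on either side
    have hA : PySem.List.pyRange 1 ((seq.length : Int)) 1 = [] :=
      PySem.List.pyRange_one_eq_nil (by omega)
    have hfd : PySem.Int.floordiv ((seq.length : Int)) 2 = 0 := by
      rw [PySem.Int.floordiv_eq_ediv_of_pos (by norm_num)]
      omega
    have hB : PySem.List.pyRange 1 (PySem.Int.floordiv ((seq.length : Int)) 2 + 1) 1 = [] := by
      rw [hfd]
      exact PySem.List.pyRange_one_eq_nil (by norm_num)
    rw [hA, hB]
    simp [PySem.List.slice]
  · have hn0 : 0 < seq.length := by omega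
    have hnI : (0 : Int) < (seq.length : Int) := by exact_mod_cast hn0
    set hN := seq.length / 2 with hhN
    have hfd : PySem.Int.floordiv ((seq.length : Int)) 2 = (hN : Int) := by
      rw [PySem.Int.floordiv_eq_ediv_of_pos (by norm_num), hhN]
      rw [Int.natCast_div]
      norm_num
    have hdm2 := Nat.div_add_mod seq.length 2
    have hNlt : hN < seq.length := by omega
    have hN1 : 1 ≤ hN := by omega
    set m := seq.length - 1 - hN with hm
    have hmle : m ≤ hN := by omega
    -- A's rows are the closed-form rows
    have hAside : (PySem.List.pyRange 1 ((seq.length : Int)) 1).map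
        (fun i => String.ofList (pvLoopA seq i seq.length 0 []))
        = ((PySem.List.pyRange 1 ((seq.length : Int)) 1).map (pvG seq)).map String.ofList := by
      rw [List.map_map]
      apply List.map_congr_left
      intro i hi
      have hthis := pvLoopA_closed seq i hn0 seq.length 0 []
      simp only [Nat.cast_zero, zero_mul, Nat.zero_add, List.nil_append] at hthis
      rw [PySem.Int.mod_eq_emod_of_pos hnI, Int.zero_emod] at hthis
      simp [Function.comp, hthis, pvG]
    rw [hAside]
    -- B's chunk-built rows are the closed-form rows for steps 1..n//2
    have hrows : (PySem.List.pyRange 1 (PySem.Int.floordiv ((seq.length : Int)) 2 + 1) 1).map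
        (fun i => pvRowB seq i seq.length 0 0 [])
        = (PySem.List.pyRange 1 ((hN : Int) + 1) 1).map (pvG seq) := by
      rw [hfd]
      apply List.map_congr_left
      intro i hi
      obtain ⟨h1i, h2i⟩ := PySem.List.mem_pyRange_one.mp hi
      have h2i' : i < (seq.length : Int) := by
        have : (hN : Int) < (seq.length : Int) := by exact_mod_cast hNlt
        omega
      have hB := pvRowB_closed seq i h1i h2i' seq.length 0 [] (Nat.zero_le _) (le_refl _)
      simp only [Nat.zero_mul, Nat.zero_mod, Nat.cast_zero, Nat.sub_zero, Nat.zero_add,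
        List.nil_append] at hB
      rw [hB]
      rfl
    rw [hrows]
    congr 1
    -- split A's rows at n//2 + 1
    rw [PySem.List.pyRange_one_append 1 ((hN : Int) + 1) ((seq.length : Int)) (by omega)
      (by exact_mod_cast hNlt), List.map_append]
    congr 1
    -- the mirrored rows are the closed-form rows for steps n//2+1..n-1
    rw [hfd]
    have hmInt : ((seq.length : Int) - 1 - (hN : Int)) = ((m : Nat) : Int) := by omega
    rw [hmInt, PySem.List.slice_to_natCast, ← List.map_take]
    have hpr1len : (PySem.List.pyRange 1 ((hN : Int) + 1) 1).length = hN := by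
      rw [PySem.List.length_pyRange_one]
      omega
    have hpr2len : (PySem.List.pyRange ((hN : Int) + 1) ((seq.length : Int)) 1).length = m := by
      rw [PySem.List.length_pyRange_one]
      omega
    have hminm : min m hN = m := Nat.min_eq_left hmle
    symm
    apply List.ext_getElem
    · simp [hpr1len, hpr2len, hminm]
    · intro j hj1 hj2
      simp only [List.getElem_map, List.getElem_reverse, List.length_map,
        List.length_take, List.getElem_take, hpr1len, hminm]
      rw [PySem.List.getElem_pyRange_one, PySem.List.getElem_pyRange_one]
      have hjm : j < m := by
        simpa [hpr1len, hminm] using hj1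
      have hk1 : (1 : Int) ≤ 1 + ((m - 1 - j : Nat) : Int) := by omega
      have hkn : 1 + ((m - 1 - j : Nat) : Int) < (seq.length : Int) := by
        omega
      rw [pv_mirror seq _ hk1 hkn]
      congr 1
      omega
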